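-- pv_equiv track=rewrite | github.com/LazyAGI/LazyLLM | docs/scripts/lazynote/agent/git_agent.py | _generate_project_tree
-- ===== SOURCE A (Python) =====
-- def _generate_project_tree(module_list: list) -> str:
--     tree_dict = {}
--     for module_path in module_list:
--         parts = module_path.split(".")
--         current = tree_dict
--         for i, part in enumerate(parts):
--             if part not in current:
--                 current[part] = {}
--             current = current[part]
--
--     def process_tree_dict(tree_dict, level=0):
--         tree = []
--         indent = "  " * level
--         for name, children in sorted(tree_dict.items()):
--             if children:
--                 tree.append(f"{indent}- {name}/")
--                 tree.extend(process_tree_dict(children, level + 1))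
--             else:
--                 tree.append(f"{indent}- {name}")
--         return tree
--
--     tree = process_tree_dict(tree_dict)
--     return "\n".join(tree)
-- ===== SOURCE B (Python) =====
-- def _generate_project_tree(module_list: list) -> str:
--     # Alternative: recursively partition the split path lists one level at a time,
--     # grouping by first segment in a single pass, and emit lines directly.
--     def build(paths, level):
--         groups = {}
--         for p in paths:
--             groups.setdefault(p[0], [])
--             if len(p) > 1:
--                 groups[p[0]].append(p[1:])
--         lines = []
--         for head in sorted(groups):
--             tails = groups[head]
--             lines.append("  " * level + "- " + head + ("/" if tails else ""))
--             lines.extend(build(tails, level + 1))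
--         return lines
--     return "\n".join(build([m.split(".") for m in module_list], 0))
-- ===== Notes on version B (the rewrite author's own statement) =====
-- stated objective: alternative
-- what changed: B recursively partitions the split path lists level by level (one grouping pass per level, then one line per sorted distinct first segment), emitting output during the recursion, instead of A's two phases of building a nested-dict trie over all paths and then rendering it with a sorted recursive walk.
import Mathlib
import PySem

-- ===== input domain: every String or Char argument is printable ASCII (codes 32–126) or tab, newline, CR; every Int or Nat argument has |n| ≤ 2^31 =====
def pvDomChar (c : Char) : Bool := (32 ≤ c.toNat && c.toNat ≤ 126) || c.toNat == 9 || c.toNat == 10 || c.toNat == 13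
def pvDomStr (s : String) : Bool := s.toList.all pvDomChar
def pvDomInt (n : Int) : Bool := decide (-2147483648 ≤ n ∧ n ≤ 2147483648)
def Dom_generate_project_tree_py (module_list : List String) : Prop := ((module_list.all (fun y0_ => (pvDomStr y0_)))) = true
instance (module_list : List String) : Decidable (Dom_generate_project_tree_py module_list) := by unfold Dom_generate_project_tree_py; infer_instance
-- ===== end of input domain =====

-- B is an alternative: it recursively partitions the split path lists by sorted first
-- segment, emitting lines directly, instead of A's nested-dict trie plus recursive render.

-- Python "  " * level (str * int on a literal of 2 spaces): exact.
def indentStr (level : Nat) : String := String.ofList (PySem.List.pyRepeat "  ".toList (level : Int))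

-- Python m.split("."): the separator is the literal "." ≠ "", so split? is always `some`.
def pySplitDot (m : String) : List String := (PySem.Str.split? m ".").getD []

-- ===== PORT A =====
-- A's nested dicts (string keys, insertion order): first-child/next-sibling encoding of the
-- association list `cons key child restOfSiblings`; `nil` is the empty dict {}.
inductive Trie where
  | nil : Trie
  | cons : String → Trie → Trie → Trie
deriving DecidableEq, Repr

-- current[part] (with {} default for an absent key, as A creates it before descending)
def Trie.childD : Trie → String → Trie
  | .nil, _ => .nil
  | .cons k c r, q => if k == q then c else r.childD q

-- dict write current[part] = v: overwrite in place, append a new key at the end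
def Trie.setChild : Trie → String → Trie → Trie
  | .nil, q, v => .cons q v .nil
  | .cons k c r, q, v => if k == q then .cons k v r else .cons k c (r.setChild q v)

-- A's inner loop `for part in parts: if part not in current: current[part] = {}; current = current[part]`
-- as structural recursion on parts ('create {} if absent, descend, write back').
def insertPath : Trie → List String → Trie
  | t, [] => t
  | t, p :: rest => t.setChild p (insertPath (t.childD p) rest)

def Trie.items : Trie → List (String × Trie)
  | .nil => []
  | .cons k c r => (k, c) :: r.items

def Trie.size : Trie → Nat
  | .nil => 0
  | .cons _ c r => 1 + c.size + r.size

-- termination helper for processTree (cited by decreasing_by)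
theorem Trie.size_lt_of_mem_items : ∀ (t : Trie) (p : String × Trie), p ∈ t.items → p.2.size < t.size := by
  intro t
  induction t with
  | nil => intro p h; simp [Trie.items] at h
  | cons k c r ihc ihr =>
    intro p h
    simp only [Trie.items, List.mem_cons] at h
    rcases h with h | h
    · subst h; simp [Trie.size]; omega
    · have := ihr p h; simp [Trie.size]; omega

-- process_tree_dict: `sorted(tree_dict.items())` compares (key, value) tuples, but all keys in a
-- dict are distinct so the comparison never reaches the values: sorting by the key alone is exact.
def processTree (t : Trie) (level : Nat) : List String :=
  ((PySem.List.sorted t.items Prod.fst).attach.map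
    (fun x =>
      if x.1.2 ≠ Trie.nil then
        (indentStr level ++ "- " ++ x.1.1 ++ "/") :: processTree x.1.2 (level + 1)
      else
        [indentStr level ++ "- " ++ x.1.1])).flatten
termination_by t.size
decreasing_by
  exact Trie.size_lt_of_mem_items t x.1 ((PySem.List.mem_sorted t.items Prod.fst false x.1).mp x.2)

def generate_project_tree_py (module_list : List String) : String :=
  PySem.Str.join "\n"
    (processTree (module_list.foldl (fun acc m => insertPath acc (pySplitDot m)) Trie.nil) 0)

-- ===== PORT B =====
-- the body of B's grouping loop: groups.setdefault(p[0], []); if len(p) > 1: groups[p[0]].append(p[1:])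
-- (p[0] ported as headD "": every p passed in is a nonempty split result)
def groupStep (d : PySem.Dict String (List (List String))) (p : List String) : PySem.Dict String (List (List String)) :=
  let d1 := PySem.Dict.setdefault d (p.headD "") []
  if 1 < p.length then PySem.Dict.modify d1 (p.headD "") [] (fun l => l ++ [p.tail]) else d1

-- groups = {}; for p in paths: <groupStep>
def groupsOf (paths : List (List String)) : PySem.Dict String (List (List String)) :=
  paths.foldl groupStep PySem.Dict.empty

-- specification value of groups[head]; used only by buildB's termination proof and the lemmas below
def tailsOf (paths : List (List String)) (head : String) : List (List String) :=
  (paths.filter (fun p => p.headD "" == head && decide (1 < p.length))).map List.tail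

-- termination helper for buildB (cited by decreasing_by)
theorem tailsOf_measure (head : String) : ∀ (paths : List (List String)),
    ((tailsOf paths head).map List.length).sum + (tailsOf paths head).length ≤ (paths.map List.length).sum := by
  intro paths
  induction paths with
  | nil => simp [tailsOf]
  | cons p rest ih =>
    by_cases hc : (p.headD "" == head && decide (1 < p.length)) = true
    · have h2 : 1 < p.length := by
        simp only [Bool.and_eq_true, decide_eq_true_eq] at hc
        exact hc.2
      have : tailsOf (p :: rest) head = p.tail :: tailsOf rest head := by
        simp only [tailsOf, List.filter_cons, hc, if_true, List.map_cons]
      rw [this]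
      simp only [List.map_cons, List.sum_cons, List.length_cons]
      have ht : p.tail.length = p.length - 1 := by simp
      simp only [tailsOf] at ih ⊢
      omega
    · have : tailsOf (p :: rest) head = tailsOf rest head := by
        simp only [tailsOf, List.filter_cons]
        rw [if_neg (by simpa using hc)]
      rw [this]
      simp only [List.map_cons, List.sum_cons]
      omega

theorem tailsOf_cons (p : List String) (rest : List (List String)) (k : String) :
    tailsOf (p :: rest) k
      = (if p.headD "" = k ∧ 1 < p.length then [p.tail] else []) ++ tailsOf rest k := by
  by_cases hc : (p.headD "" == k && decide (1 < p.length)) = true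
  · have hcp : p.headD "" = k ∧ 1 < p.length := by simpa using hc
    simp only [tailsOf, List.filter_cons, hc, if_true, List.map_cons, if_pos hcp,
      List.singleton_append]
  · have hcp : ¬(p.headD "" = k ∧ 1 < p.length) := by simpa using hc
    simp only [tailsOf, List.filter_cons]
    rw [if_neg (by simpa using hc), if_neg hcp, List.nil_append]

theorem groupStep_getD (d : PySem.Dict String (List (List String))) (p : List String) (k : String) :
    (groupStep d p).getD k []
      = d.getD k [] ++ (if p.headD "" = k ∧ 1 < p.length then [p.tail] else []) := by
  unfold groupStep
  by_cases hl : 1 < p.length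
  · simp only [hl, if_true]
    rw [PySem.Dict.getD_modify]
    by_cases hk : k = p.headD ""
    · rw [if_pos hk, hk, PySem.Dict.getD_setdefault_self]
      simp
    · rw [if_neg hk, PySem.Dict.getD_eq_get?_getD,
        PySem.Dict.get?_setdefault_of_ne _ _ hk, ← PySem.Dict.getD_eq_get?_getD]
      have hne' : ¬ p.headD "" = k := fun h => hk h.symm
      simpa using hne' 
  · simp only [hl, if_false]
    by_cases hk : k = p.headD ""
    · rw [hk, PySem.Dict.getD_setdefault_self]
      simp
    · rw [PySem.Dict.getD_eq_get?_getD, PySem.Dict.get?_setdefault_of_ne _ _ hk,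
        ← PySem.Dict.getD_eq_get?_getD]
      simp

theorem groups_getD_aux : ∀ (paths : List (List String)) (d : PySem.Dict String (List (List String))) (k : String),
    (paths.foldl groupStep d).getD k [] = d.getD k [] ++ tailsOf paths k := by
  intro paths
  induction paths with
  | nil => intro d k; simp [tailsOf]
  | cons p rest ih =>
    intro d k
    simp only [List.foldl_cons]
    rw [ih, groupStep_getD, tailsOf_cons, List.append_assoc]

-- groups[head] (head always present: it is drawn from groups' keys) equals the filtered tails
theorem groups_getD (paths : List (List String)) (k : String) :
    (groupsOf paths).getD k [] = tailsOf paths k := by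
  unfold groupsOf
  rw [groups_getD_aux]
  simp [PySem.Dict.getD_empty]

theorem groupStep_keys (d : PySem.Dict String (List (List String))) (p : List String) :
    (groupStep d p).keys = PySem.Set.add d.keys (p.headD "") := by
  unfold groupStep
  have hsd : (PySem.Dict.setdefault d (p.headD "") []).keys
      = if d.contains (p.headD "") = true then d.keys else d.keys ++ [p.headD ""] :=
    PySem.Dict.keys_setdefault d _ _
  have hadd : PySem.Set.add d.keys (p.headD "")
      = if d.contains (p.headD "") = true then d.keys else d.keys ++ [p.headD ""] := by
    rw [PySem.Dict.contains_eq_decide_mem_keys]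
    simp [PySem.Set.add]
  by_cases hl : 1 < p.length
  · simp only [hl, if_true]
    rw [PySem.Dict.keys_modify, PySem.Dict.keys_insert_of_contains, hsd, hadd]
    rw [PySem.Dict.contains_setdefault]
    simp
  · simp only [hl, if_false]
    rw [hsd, hadd]

theorem groups_keys_aux : ∀ (paths : List (List String)) (d : PySem.Dict String (List (List String))),
    (paths.foldl groupStep d).keys = PySem.Set.update d.keys (paths.map (fun p => p.headD "")) := by
  intro paths
  induction paths with
  | nil => intro d; simp [PySem.Set.update]
  | cons p rest ih =>
    intro d
    simp only [List.foldl_cons, List.map_cons]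
    rw [ih, groupStep_keys]
    simp [PySem.Set.update]

-- the keys of groups, in insertion order, are the distinct heads in first-occurrence order
theorem groups_keys (paths : List (List String)) :
    (groupsOf paths).keys = PySem.Set.ofList (paths.map (fun p => p.headD "")) := by
  unfold groupsOf
  rw [groups_keys_aux, PySem.Set.ofList_eq_foldl]
  simp [PySem.Set.update, PySem.Dict.keys_empty]

-- build(paths, level): group by first segment in one pass, then one line per sorted key, recursing into its tails
def buildB (paths : List (List String)) (level : Nat) : List String :=
  ((PySem.List.sorted (groupsOf paths).keys (fun x => x)).attach.map
    (fun x =>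
      (indentStr level ++ "- " ++ x.1 ++ (if (groupsOf paths).getD x.1 [] ≠ [] then "/" else "")) ::
        buildB ((groupsOf paths).getD x.1 []) (level + 1))).flatten
termination_by (paths.map List.length).sum + paths.length
decreasing_by
  rw [groups_getD]
  have hmem : x.1 ∈ paths.map (fun p => p.headD "") := by
    have h1 := (PySem.List.mem_sorted _ _ false x.1).mp x.2
    simp only [groups_keys] at h1
    exact (PySem.Set.mem_ofList _ _).mp h1
  have hne : paths ≠ [] := by
    intro h; subst h; simp at hmem
  have h1 : 1 ≤ paths.length := List.length_pos_iff.mpr hne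
  have h2 := tailsOf_measure x.1 paths
  omega

def generate_project_tree_py_alt (module_list : List String) : String :=
  PySem.Str.join "\n" (buildB (module_list.map pySplitDot) 0)

-- ===== PRECONDITION & SPEC =====
def Spec_generate_project_tree_py (module_list : List String) (out : String) : Prop := out = generate_project_tree_py_alt module_list
instance (module_list : List String) (out : String) : Decidable (Spec_generate_project_tree_py module_list out) := by unfold Spec_generate_project_tree_py; infer_instance

-- ===== CLAIM (what is proved, stated in full; the proofs are below) =====
def Claim_equal_generate_project_tree_py : Prop := ∀ (module_list : List String), Dom_generate_project_tree_py module_list → Spec_generate_project_tree_py module_list (generate_project_tree_py module_list)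

-- ===== LEMMAS AND PROOFS =====

def Trie.keys (t : Trie) : List String := t.items.map Prod.fst

theorem childD_setChild_self : ∀ (t : Trie) (k : String) (v : Trie), (t.setChild k v).childD k = v := by
  intro t k v
  induction t with
  | nil => simp [Trie.setChild, Trie.childD]
  | cons k' c r ihc ihr =>
    by_cases h : k' = k
    · subst h; simp [Trie.setChild, Trie.childD]
    · simp [Trie.setChild, Trie.childD, h, ihr]

theorem childD_setChild_ne : ∀ (t : Trie) (k q : String) (v : Trie), k ≠ q → (t.setChild k v).childD q = t.childD q := by
  intro t k q v h
  induction t with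
  | nil => simp [Trie.setChild, Trie.childD, h]
  | cons k' c r ihc ihr =>
    by_cases h' : k' = k
    · subst h'; simp [Trie.setChild, Trie.childD, h]
    · simp only [Trie.setChild, beq_iff_eq, h', if_false, Trie.childD]
      by_cases h'' : k' = q <;> simp [h'', ihr]

theorem keys_setChild : ∀ (t : Trie) (k : String) (v : Trie),
    (t.setChild k v).keys = if k ∈ t.keys then t.keys else t.keys ++ [k] := by
  intro t k v
  induction t with
  | nil => simp [Trie.setChild, Trie.keys, Trie.items]
  | cons k' c r ihc ihr =>
    by_cases h : k' = k
    · subst h; simp [Trie.setChild, Trie.keys, Trie.items]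
    · simp only [Trie.setChild, beq_iff_eq, h, if_false, Trie.keys, Trie.items, List.map_cons] at ihr ⊢
      rw [ihr]
      by_cases hm : k ∈ List.map Prod.fst r.items <;>
        simp [hm, Ne.symm h]

theorem childD_insertPath : ∀ (t : Trie) (p : List String) (q : String),
    (insertPath t p).childD q =
      if p.headD "" = q ∧ 1 < p.length then insertPath (t.childD q) p.tail else t.childD q := by
  intro t p q
  cases p with
  | nil => simp [insertPath]
  | cons a rest =>
    by_cases h : a = q
    · subst h
      cases rest with
      | nil => simp [insertPath, childD_setChild_self]
      | cons b rest' => simp [insertPath, childD_setChild_self]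
    · simp [insertPath, childD_setChild_ne _ _ _ _ h, h]

theorem childD_foldl : ∀ (paths : List (List String)) (t : Trie) (q : String),
    (paths.foldl insertPath t).childD q = (tailsOf paths q).foldl insertPath (t.childD q) := by
  intro paths
  induction paths with
  | nil => intro t q; simp [tailsOf]
  | cons p rest ih =>
    intro t q
    simp only [List.foldl_cons]
    rw [ih]
    by_cases hc : (p.headD "" == q && decide (1 < p.length)) = true
    · have hcp : p.headD "" = q ∧ 1 < p.length := by simpa using hc
      have : tailsOf (p :: rest) q = p.tail :: tailsOf rest q := by
        simp only [tailsOf, List.filter_cons, hc, if_true, List.map_cons]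
      rw [this, List.foldl_cons, childD_insertPath, if_pos hcp]
    · have hcp : ¬(p.headD "" = q ∧ 1 < p.length) := by simpa using hc
      have : tailsOf (p :: rest) q = tailsOf rest q := by
        simp only [tailsOf, List.filter_cons]
        rw [if_neg (by simpa using hc)]
      rw [this, childD_insertPath, if_neg hcp]

theorem keys_insertPath_mem : ∀ (t : Trie) (p : List String) (q : String), p ≠ [] →
    (q ∈ (insertPath t p).keys ↔ q ∈ t.keys ∨ q = p.headD "") := by
  intro t p q hp
  cases p with
  | nil => exact absurd rfl hp
  | cons a rest =>
    simp only [insertPath, keys_setChild]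
    by_cases hm : a ∈ t.keys
    · simp only [hm, if_true, List.headD_cons]
      constructor
      · exact Or.inl
      · rintro (h | rfl); exact h; exact hm
    · simp [hm, List.mem_append]

theorem keys_nodup_insertPath : ∀ (t : Trie) (p : List String), t.keys.Nodup → (insertPath t p).keys.Nodup := by
  intro t p h
  cases p with
  | nil => exact h
  | cons a rest =>
    simp only [insertPath, keys_setChild]
    by_cases hm : a ∈ t.keys
    · simp [hm, h]
    · rw [if_neg hm]
      have : (t.keys ++ [a]).Nodup ↔ (a :: t.keys).Nodup :=
        List.Perm.nodup_iff (List.perm_append_singleton a t.keys)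
      rw [this, List.nodup_cons]
      exact ⟨hm, h⟩

theorem keys_nodup_foldl : ∀ (paths : List (List String)) (t : Trie), t.keys.Nodup → (paths.foldl insertPath t).keys.Nodup := by
  intro paths
  induction paths with
  | nil => intro t h; exact h
  | cons p rest ih => intro t h; exact ih _ (keys_nodup_insertPath t p h)

theorem keys_mem_foldl : ∀ (paths : List (List String)) (t : Trie) (q : String),
    (∀ p ∈ paths, p ≠ []) →
    (q ∈ (paths.foldl insertPath t).keys ↔ q ∈ t.keys ∨ q ∈ paths.map (fun p => p.headD "")) := by
  intro paths
  induction paths with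
  | nil => intro t q _; simp
  | cons p rest ih =>
    intro t q hne
    simp only [List.foldl_cons]
    rw [ih _ _ (fun x hx => hne x (List.mem_cons_of_mem _ hx)),
        keys_insertPath_mem t p q (hne p (List.mem_cons_self))]
    simp only [List.map_cons, List.mem_cons]
    tauto

theorem items_eq_map_keys : ∀ (t : Trie), t.keys.Nodup → t.items = t.keys.map (fun k => (k, t.childD k)) := by
  intro t
  induction t with
  | nil => intro _; simp [Trie.items, Trie.keys]
  | cons k c r ihc ihr =>
    intro h
    have hk : k ∉ r.keys := by
      simp only [Trie.keys, Trie.items, List.map_cons, List.nodup_cons] at h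
      exact h.1
    have hr : r.keys.Nodup := by
      simp only [Trie.keys, Trie.items, List.map_cons, List.nodup_cons] at h
      exact h.2
    simp only [Trie.items, Trie.keys, List.map_cons, Trie.childD]
    simp only [beq_self_eq_true, if_true, List.cons.injEq, true_and]
    rw [ihr hr, List.map_map, List.map_map]
    apply List.map_congr_left
    intro q hq
    have : k ≠ q := fun h' => hk (h' ▸ hq)
    simp [Function.comp, this]

theorem insertPath_ne_nil_of_ne : ∀ (t : Trie) (p : List String), t ≠ Trie.nil → insertPath t p ≠ Trie.nil := by
  intro t p ht
  cases p with
  | nil => exact ht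
  | cons a rest =>
    cases t with
    | nil => exact absurd rfl ht
    | cons k c r =>
      simp only [insertPath, Trie.setChild]
      split <;> simp

theorem insertPath_ne_nil_of_cons : ∀ (t : Trie) (a : String) (rest : List String), insertPath t (a :: rest) ≠ Trie.nil := by
  intro t a rest
  cases t <;> (simp only [insertPath, Trie.setChild]; try split) <;> simp

theorem foldl_ne_nil : ∀ (paths : List (List String)) (t : Trie), t ≠ Trie.nil → paths.foldl insertPath t ≠ Trie.nil := by
  intro paths
  induction paths with
  | nil => intro t h; exact h
  | cons p rest ih => intro t h; exact ih _ (insertPath_ne_nil_of_ne t p h)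

theorem foldl_nil_eq_nil_iff : ∀ (ts : List (List String)), (∀ p ∈ ts, p ≠ []) →
    (ts.foldl insertPath Trie.nil = Trie.nil ↔ ts = []) := by
  intro ts hne
  constructor
  · intro h
    cases ts with
    | nil => rfl
    | cons p rest =>
      exfalso
      cases p with
      | nil => exact hne [] List.mem_cons_self rfl
      | cons a r =>
        exact foldl_ne_nil rest _ (insertPath_ne_nil_of_cons Trie.nil a r) (by simpa using h)
  · intro h; subst h; rfl

theorem tailsOf_forall_ne_nil : ∀ (paths : List (List String)) (head : String) (p : List String),
    p ∈ tailsOf paths head → p ≠ [] := by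
  intro paths head p hp
  obtain ⟨q, hq, rfl⟩ := List.mem_map.mp hp
  have := List.of_mem_filter hq
  simp only [Bool.and_eq_true, decide_eq_true_eq] at this
  have h2 := this.2
  intro h
  have : q.length ≤ 1 := by
    cases q with
    | nil => simp
    | cons a r => simp at h ⊢; simp [h]
  omega

theorem processTree_eq (t : Trie) (level : Nat) :
    processTree t level = ((PySem.List.sorted t.items Prod.fst).map
      (fun y => if y.2 ≠ Trie.nil then (indentStr level ++ "- " ++ y.1 ++ "/") :: processTree y.2 (level + 1)
                else [indentStr level ++ "- " ++ y.1])).flatten := by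
  rw [processTree]
  congr 1
  exact List.attach_map_val (f := fun (y : String × Trie) => if y.2 ≠ Trie.nil then (indentStr level ++ "- " ++ y.1 ++ "/") :: processTree y.2 (level + 1) else [indentStr level ++ "- " ++ y.1])

theorem buildB_eq (paths : List (List String)) (level : Nat) :
    buildB paths level = ((PySem.List.sorted (PySem.Set.ofList (paths.map (fun p => p.headD ""))) (fun x => x)).map
      (fun k => (indentStr level ++ "- " ++ k ++ (if tailsOf paths k ≠ [] then "/" else "")) ::
        buildB (tailsOf paths k) (level + 1))).flatten := by
  rw [buildB]
  rw [List.attach_map_val (f := fun k => (indentStr level ++ "- " ++ k ++ (if (groupsOf paths).getD k [] ≠ [] then "/" else "")) :: buildB ((groupsOf paths).getD k []) (level + 1))]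
  simp only [groups_keys, groups_getD]

theorem buildB_nil (level : Nat) : buildB [] level = [] := by
  rw [buildB_eq]
  rfl

theorem processTree_nil (level : Nat) : processTree Trie.nil level = [] := by
  rw [processTree_eq]
  rfl

theorem sorted_items_eq (paths : List (List String)) (hne : ∀ p ∈ paths, p ≠ []) :
    PySem.List.sorted (paths.foldl insertPath Trie.nil).items Prod.fst
    = (PySem.List.sorted (PySem.Set.ofList (paths.map (fun p => p.headD ""))) (fun x => x)).map
        (fun k => (k, (paths.foldl insertPath Trie.nil).childD k)) := by
  have hnd : (paths.foldl insertPath Trie.nil).keys.Nodup :=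
    keys_nodup_foldl paths Trie.nil (by simp [Trie.keys, Trie.items])
  have hmem : ∀ q, q ∈ (paths.foldl insertPath Trie.nil).keys ↔ q ∈ paths.map (fun p => p.headD "") := by
    intro q
    rw [keys_mem_foldl paths Trie.nil q hne]
    simp [Trie.keys, Trie.items]
  apply PySem.List.sorted_eq_of_perm_of_pairwise_lt
  · rw [items_eq_map_keys _ hnd]
    apply List.Perm.map
    refine (PySem.List.sorted_perm _ _ _).trans ?_
    refine (List.perm_ext_iff_of_nodup (PySem.Set.nodup_ofList _) hnd).mpr ?_
    intro a
    rw [PySem.Set.mem_ofList, hmem a]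
  · rw [List.pairwise_map]
    exact PySem.List.sorted_ofList_pairwise_lt _

theorem main_aux : ∀ (n : Nat) (paths : List (List String)),
    (paths.map List.length).sum + paths.length ≤ n →
    (∀ p ∈ paths, p ≠ []) →
    ∀ level, processTree (paths.foldl insertPath Trie.nil) level = buildB paths level := by
  intro n
  induction n with
  | zero =>
    intro paths h hne level
    have hp : paths = [] := by
      cases paths with
      | nil => rfl
      | cons p rest => simp at h
    subst hp
    simp only [List.foldl_nil, processTree_nil, buildB_nil]
  | succ n ih =>
    intro paths h hne level
    by_cases hp : paths = []
    · subst hp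
      simp only [List.foldl_nil, processTree_nil, buildB_nil]
    · rw [processTree_eq, sorted_items_eq paths hne, List.map_map, buildB_eq]
      congr 1
      apply List.map_congr_left
      intro k hk
      simp only [Function.comp]
      rw [childD_foldl paths Trie.nil k]
      have hchild : Trie.childD Trie.nil k = Trie.nil := rfl
      rw [hchild]
      have htne : ∀ p ∈ tailsOf paths k, p ≠ [] := tailsOf_forall_ne_nil paths k
      by_cases ht : tailsOf paths k = []
      · rw [ht]
        simp only [List.foldl_nil, ne_eq, not_true_eq_false, if_false, buildB_nil]
        rw [show ((indentStr level ++ "- " ++ k ++ "") : String) = indentStr level ++ "- " ++ k from by simp]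
      · have hT : (tailsOf paths k).foldl insertPath Trie.nil ≠ Trie.nil := by
          intro hcon
          exact ht ((foldl_nil_eq_nil_iff _ htne).mp hcon)
        rw [if_pos hT, if_pos ht]
        congr 1
        apply ih
        · have h1 := tailsOf_measure k paths
          have h2 : 1 ≤ paths.length := List.length_pos_iff.mpr hp
          omega
        · exact htne

theorem go_len (sep : List Char) : ∀ (fuel : Nat) (l cur : List Char) (acc : List (List Char)),
    acc.length < (PySem.Chars.splitOn.go sep fuel l cur acc).length := by
  intro fuel
  induction fuel with
  | zero => intro l cur acc; rw [PySem.Chars.splitOn.go]; simp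
  | succ f ih =>
    intro l cur acc
    cases l with
    | nil => rw [PySem.Chars.splitOn.go]; simp; omega
    | cons c rest =>
      rw [PySem.Chars.splitOn.go]
      by_cases h : sep.isPrefixOf (c :: rest) = true
      · simp only [h, if_true]
        have := ih (List.drop sep.length (c :: rest)) [] (cur.reverse :: acc)
        simp at this ⊢; omega
      · simp only [h]
        exact ih rest (c :: cur) acc

theorem split_ne_nil (m : String) : pySplitDot m ≠ [] := by
  unfold pySplitDot
  simp only [PySem.Str.split?, PySem.Chars.split?]
  have hsep : (".".toList).isEmpty = false := by decide
  rw [hsep]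
  simp only [Bool.false_eq_true, if_false, Option.map_some, Option.getD_some]
  intro h
  have h2 : PySem.Chars.splitOn m.toList ".".toList = [] := List.map_eq_nil_iff.mp h
  have h3 := go_len ".".toList (m.toList.length + 1) m.toList [] []
  rw [PySem.Chars.splitOn] at h2
  rw [h2] at h3
  simp at h3

-- ===== VERDICT (by name: the statement is the Claim_ definition above) =====
theorem generate_project_tree_py_spec : Claim_equal_generate_project_tree_py := by
  intro module_list _
  unfold Spec_generate_project_tree_py generate_project_tree_py generate_project_tree_py_alt
  have hfold : module_list.foldl (fun acc m => insertPath acc (pySplitDot m)) Trie.nil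
      = (module_list.map pySplitDot).foldl insertPath Trie.nil := by
    rw [List.foldl_map]
  rw [hfold]
  congr 1
  exact main_aux (((module_list.map pySplitDot).map List.length).sum + (module_list.map pySplitDot).length)
    (module_list.map pySplitDot) le_rfl
    (by intro p hp; obtain ⟨m, _, rfl⟩ := List.mem_map.mp hp; exact split_ne_nil m) 0
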